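-- pv_equiv track=rewrite | github.com/zea17/dragon-bank | bank.application.py | text_binary_search
-- ===== SOURCE A (Python) =====
-- import math
--
-- def text_binary_search(input_list, field, query):
--     """
--     A custom binary search implementation that:
--     (1) Assumes the input_list to have elements of type object
--         and then sorts by a common key in all those abjects name
--         "field"
--     (2) Lowercases and trims the text in the fields
--         so for example "foo bar" can match "FooBar"
--     """
--     low = 0
--     high = len(input_list) - 1
--     query = make_text_searchable(query)
--     while low <= high:
--         mid = math.floor((low + high) / 2)
--         if make_text_searchable(input_list[mid][field]) > query:
--             high = mid - 1
--         elif make_text_searchable(input_list[mid][field]) < query: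
--             low = mid + 1
--         else:
--             return mid
--     return -1
--
-- def make_text_searchable(text):
--     """
--     Lowercases the text and removes spaces
--     """
--     return text.lower().replace(" ", "")
-- ===== SOURCE B (Python) =====
-- def make_text_searchable(text):
--     return text.lower().replace(" ", "")
--
--
-- def text_binary_search(input_list, field, query):
--     # Normalize the query once and precompute every normalized key, then search
--     # recursively on list SLICES carrying an offset (no low/high indices at all):
--     # the probed element of a segment is its own middle, (len(seg)-1)//2, which
--     # coincides with A's floor((low+high)/2) probe, so the returned index is the
--     # same even on duplicate or unsorted data.
--     q = make_text_searchable(query)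
--     keys = [make_text_searchable(d[field]) for d in input_list]
--
--     def go(seg, off):
--         if not seg:
--             return -1
--         m = (len(seg) - 1) // 2
--         k = seg[m]
--         if k == q:
--             return off + m
--         if k < q:
--             return go(seg[m + 1:], off + m + 1)
--         return go(seg[:m], off)
--
--     return go(keys, 0)
-- ===== Notes on version B (the rewrite author's own statement) =====
-- stated objective: alternative
-- what changed: B normalizes the query once and precomputes all normalized keys, then searches by structural recursion on list slices with an offset (probing each segment's own middle element), instead of A's index-based while loop over (low, high) that re-normalizes the dict field twice per probe.
-- outside the precondition, e.g. on text_binary_search([{'x': 'a'}, {'f': 'b'}, {'x': 'c'}], 'f', 'b'): A returns 1, B raises KeyError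
import Mathlib
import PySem

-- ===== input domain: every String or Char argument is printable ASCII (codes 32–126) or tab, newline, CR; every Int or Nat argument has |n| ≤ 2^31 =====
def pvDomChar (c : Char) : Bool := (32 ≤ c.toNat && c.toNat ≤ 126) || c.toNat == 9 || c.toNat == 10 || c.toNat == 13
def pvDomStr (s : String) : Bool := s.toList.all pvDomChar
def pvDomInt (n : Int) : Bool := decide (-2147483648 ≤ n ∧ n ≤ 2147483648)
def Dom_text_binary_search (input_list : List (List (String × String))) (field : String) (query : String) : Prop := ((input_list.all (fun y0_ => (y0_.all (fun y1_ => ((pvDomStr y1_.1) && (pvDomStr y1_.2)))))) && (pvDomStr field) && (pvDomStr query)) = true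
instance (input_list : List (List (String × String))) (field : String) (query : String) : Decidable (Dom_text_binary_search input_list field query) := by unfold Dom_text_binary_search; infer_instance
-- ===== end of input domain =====

-- B precomputes every normalized key once and searches by structural recursion on list
-- SLICES carrying an offset (no low/high indices), instead of A's index-based while loop
-- normalizing the dict field at each probe; same value on Pre_ (alternative, no speed claim).


-- ===== PORT A =====
-- make_text_searchable(text) = text.lower().replace(" ", "")
def mkSearchable (text : String) : String :=
  PySem.Str.replace (PySem.Str.lower text) " " ""

-- d[field] on the association list modelling the dict: first matching key.
-- The "" default is only reached when the key is absent, i.e. where the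
-- Python raises KeyError — excluded by Pre_text_binary_search.
def dictGet (d : List (String × String)) (k : String) : String :=
  ((d.find? (fun p => p.1 == k)).map Prod.snd).getD ""

-- the while loop of A; 'entry' default [] is unreachable (mid stays in range)
def tbsLoop (input_list : List (List (String × String))) (field q : String)
    (low high : Int) : Int :=
  if h : low ≤ high then
    let mid := PySem.Int.floordiv (low + high) 2
    let entry := (PySem.List.pyGet? input_list mid).getD []
    if mkSearchable (dictGet entry field) > q then
      tbsLoop input_list field q low (mid - 1)
    else if mkSearchable (dictGet entry field) < q then
      tbsLoop input_list field q (mid + 1) high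
    else mid
  else -1
termination_by (high + 1 - low).toNat
decreasing_by
  all_goals
    have hb := PySem.Int.floordiv_two_mid_bounds h
    omega

def text_binary_search (input_list : List (List (String × String))) (field : String) (query : String) : Int :=
  tbsLoop input_list field (mkSearchable query) 0 ((input_list.length : Int) - 1)

-- ===== PORT B =====
-- go(seg, off): recursion on a segment (a slice of the key list) with its offset.
-- m = (len(seg)-1)//2 is computed in Nat (len(seg) ≥ 1 in that branch, so Python's
-- floor division is exactly Nat division); seg[m] is Python indexing (in range).
def tbsGoSeg (q : String) (seg : List String) (off : Int) : Int :=
  if hne : seg = [] then -1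
  else
    let m : Nat := (seg.length - 1) / 2
    let k := (PySem.List.pyGet? seg (m : Int)).getD ""
    if k = q then off + m
    else if k < q then
      tbsGoSeg q (PySem.List.slice seg (some ((m + 1 : Nat) : Int)) none) (off + (m : Int) + 1)
    else
      tbsGoSeg q (PySem.List.slice seg none (some ((m : Nat) : Int))) off
termination_by seg.length
decreasing_by
  · have hpos : 0 < seg.length := List.length_pos_of_ne_nil hne
    rw [PySem.List.slice_from_natCast]
    simp [List.length_drop]
    omega
  · have hpos : 0 < seg.length := List.length_pos_of_ne_nil hne
    rw [PySem.List.slice_to_natCast]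
    simp [List.length_take]
    omega

def text_binary_search_alt (input_list : List (List (String × String))) (field : String) (query : String) : Int :=
  let q := mkSearchable query
  let keys := input_list.map (fun d => mkSearchable (dictGet d field))
  tbsGoSeg q keys 0

-- ===== PRECONDITION & SPEC =====
-- Pre_ requires every element to contain the field key: Python A raises KeyError when a
-- PROBED midpoint lacks it, so A can still return on lists where only unprobed elements
-- lack the key (see the cite), while B normalizes every element and raises there.
def Pre_text_binary_search (input_list : List (List (String × String))) (field : String) (query : String) : Prop :=
  ∀ d ∈ input_list, field ∈ d.map Prod.fst
instance (input_list : List (List (String × String))) (field : String) (query : String) : Decidable (Pre_text_binary_search input_list field query) := by unfold Pre_text_binary_search; infer_instance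

def pvWitness_text_binary_search : (List (List (String × String))) × String × String :=
  ([[("name", "Foo Bar")], [("name", "zed")]], "name", "FOObar")

def Spec_text_binary_search (input_list : List (List (String × String))) (field : String) (query : String) (out : Int) : Prop := out = text_binary_search_alt input_list field query
instance (input_list : List (List (String × String))) (field : String) (query : String) (out : Int) : Decidable (Spec_text_binary_search input_list field query out) := by unfold Spec_text_binary_search; infer_instance

-- ===== CLAIM (what is proved, stated in full; the proofs are below) =====
def Claim_equal_text_binary_search : Prop := ∀ (input_list : List (List (String × String))) (field : String) (query : String), Dom_text_binary_search input_list field query → Pre_text_binary_search input_list field query → Spec_text_binary_search input_list field query (text_binary_search input_list field query)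

-- ===== LEMMAS AND PROOFS =====

-- A's loop on window (low, high) equals B's segment search on the slice
-- keys[low : high+1] with offset low: both probe the same element, because
-- low + (len(seg)-1)//2 = floor((low+high)/2).
lemma tbsLoop_eq_tbsGoSeg (l : List (List (String × String))) (field q : String) :
    ∀ (n : Nat) (low high : Int), 0 ≤ low → high < (l.length : Int) →
      (high + 1 - low).toNat = n →
      tbsLoop l field q low high
        = tbsGoSeg q (((l.map (fun d => mkSearchable (dictGet d field))).drop low.toNat).take n) low := by
  intro n
  induction n using Nat.strong_induction_on with
  | _ n ih =>
    intro low high hlow hhigh hn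
    set keys := l.map (fun d => mkSearchable (dictGet d field)) with hkeys
    have hklen : keys.length = l.length := by simp [hkeys]
    rw [tbsLoop, tbsGoSeg]
    by_cases h : low ≤ high
    · -- nonempty window
      have hseglen : (((keys.drop low.toNat).take n)).length = n := by
        simp [List.length_take, List.length_drop, hklen]
        omega
      have hnpos : 0 < n := by omega
      have hne : ((keys.drop low.toNat).take n) ≠ [] := by
        intro hc; rw [hc] at hseglen; simp at hseglen; omega
      rw [dif_pos h, dif_neg hne]
      -- the probed index
      have hmid : PySem.Int.floordiv (low + high) 2 = low + ((n - 1) / 2 : Nat) := by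
        have h2 : (0:Int) < 2 := by omega
        rw [PySem.Int.floordiv_eq_ediv_of_pos h2]
        omega
      set m : Nat := (n - 1) / 2 with hm
      have hmn : m < n := by omega
      have hidx : low.toNat + m < l.length := by omega
      -- A's probed entry
      have hA : PySem.List.pyGet? l (low + (m : Int))
          = some l[low.toNat + m] := by
        have : low + (m:Int) = ((low.toNat + m : Nat) : Int) := by omega
        rw [this, PySem.List.pyGet?_natCast, List.getElem?_eq_getElem hidx]
      -- B's probed key
      have hmseg : ((((keys.drop low.toNat).take n).length - 1) / 2) = m := by
        rw [hseglen]
      have hB : PySem.List.pyGet? ((keys.drop low.toNat).take n) ((m:Nat) : Int)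
          = some (mkSearchable (dictGet l[low.toNat + m] field)) := by
        rw [PySem.List.pyGet?_natCast]
        rw [List.getElem?_take_of_lt hmn, List.getElem?_drop]
        have hidx' : low.toNat + m < keys.length := by omega
        rw [List.getElem?_eq_getElem hidx']
        simp [hkeys]
      simp only [hmid, hA, hmseg, hB, Option.getD_some]
      set a := mkSearchable (dictGet l[low.toNat + m] field) with ha
      rcases lt_trichotomy a q with hlt | heq | hgt
      · -- a < q : A goes right (low = mid+1), B drops m+1 elements
        rw [if_neg (by exact not_lt.mpr hlt.le), if_pos hlt,
            if_neg (ne_of_lt hlt), if_pos hlt]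
        rw [PySem.List.slice_from_natCast, List.drop_take, List.drop_drop]
        have hrec := ih (n - (m + 1)) (by omega) (low + (m:Int) + 1) high
          (by omega) hhigh (by omega)
        have h3 : (low + (m:Int) + 1).toNat = low.toNat + (m + 1) := by omega
        rw [h3] at hrec
        exact hrec
      · rw [if_neg (by simp [heq]), if_neg (by simp [heq]), if_pos heq]
      · -- a > q : A goes left (high = mid-1), B takes the first m elements
        rw [if_pos hgt, if_neg (ne_of_gt hgt), if_neg (not_lt.mpr hgt.le)]
        rw [PySem.List.slice_to_natCast, List.take_take, min_eq_left hmn.le]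
        exact ih m hmn low (low + (m:Int) - 1) hlow (by omega) (by omega)
    · rw [dif_neg h]
      have : n = 0 := by omega
      simp [this]

-- ===== VERDICT (by name: the statement is the Claim_ definition above) =====
theorem text_binary_search_spec : Claim_equal_text_binary_search := by
  intro l field query _dom _pre
  unfold Spec_text_binary_search text_binary_search text_binary_search_alt
  have := tbsLoop_eq_tbsGoSeg l field (mkSearchable query)
    l.length 0 ((l.length : Int) - 1) (by omega) (by omega) (by omega)
  simp only [Int.toNat_zero, List.drop_zero] at this
  rw [this, show l.length = (l.map (fun d => mkSearchable (dictGet d field))).length from (List.length_map ..).symm, List.take_length]
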